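-- pv_equiv track=rewrite | github.com/DustinYates/cheatah | app/domain/services/customer_service_voice_service.py | _is_escalation_request
-- ===== SOURCE A (Python) =====
-- def _is_escalation_request(text: str) -> bool:
--     """Check if user is requesting to speak to a human.
--
--     Args:
--         text: User's transcribed speech
--
--     Returns:
--         True if escalation requested
--     """
--     escalation_phrases = [
--         "speak to a human",
--         "speak to a person",
--         "talk to someone",
--         "real person",
--         "representative",
--         "operator",
--         "agent",
--         "manager",
--         "supervisor",
--         "transfer me",
--         "live person",
--     ]
--     text_lower = text.lower()
--     return any(phrase in text_lower for phrase in escalation_phrases)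
-- ===== SOURCE B (Python) =====
-- _ESCALATION_PHRASES = (
--     "speak to a human",
--     "speak to a person",
--     "talk to someone",
--     "real person",
--     "representative",
--     "operator",
--     "agent",
--     "manager",
--     "supervisor",
--     "transfer me",
--     "live person",
-- )
--
--
-- def _is_escalation_request(text: str) -> bool:
--     """Scan the lowered text position by position, testing whether any
--     escalation phrase starts there."""
--     t = text.lower()
--     for i in range(len(t) + 1):
--         if any(t.startswith(p, i) for p in _ESCALATION_PHRASES):
--             return True
--     return False
-- ===== Notes on version B (the rewrite author's own statement) =====
-- stated objective: alternative
-- what changed: B replaces A's phrase-by-phrase substring membership (any(phrase in text_lower)) with a single position-major scan of the lowered text that tests at each offset whether some phrase starts there.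
import Mathlib
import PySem

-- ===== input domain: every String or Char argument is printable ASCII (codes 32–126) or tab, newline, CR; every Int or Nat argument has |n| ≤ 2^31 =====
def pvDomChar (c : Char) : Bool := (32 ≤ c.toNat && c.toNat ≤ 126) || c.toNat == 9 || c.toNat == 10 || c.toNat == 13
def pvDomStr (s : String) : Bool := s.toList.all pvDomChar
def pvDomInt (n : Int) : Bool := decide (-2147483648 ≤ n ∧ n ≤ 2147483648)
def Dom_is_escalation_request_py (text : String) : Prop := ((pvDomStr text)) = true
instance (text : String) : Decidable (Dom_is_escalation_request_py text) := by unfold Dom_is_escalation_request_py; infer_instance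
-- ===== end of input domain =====

-- B replaces A's phrase-by-phrase substring membership with a position-major scan
-- of the lowered text (objective: alternative, same cost).

-- ===== PORT A =====
-- A's local list of escalation phrases
def escalationPhrases : List String :=
  [ "speak to a human", "speak to a person", "talk to someone", "real person",
    "representative", "operator", "agent", "manager", "supervisor",
    "transfer me", "live person" ]

def is_escalation_request_py (text : String) : Bool :=
  -- text_lower = text.lower(); any(phrase in text_lower for phrase in escalation_phrases)
  escalationPhrases.any (fun p => PySem.Str.isIn p (PySem.Str.lower text))

-- ===== PORT B =====
-- B's module-level phrase tuple
def escalationPhrasesAlt : List String :=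
  [ "speak to a human", "speak to a person", "talk to someone", "real person",
    "representative", "operator", "agent", "manager", "supervisor",
    "transfer me", "live person" ]

-- the 'for i in range(len(t)+1)' loop of B: walk the suffixes of the lowered text,
-- at each offset testing whether some phrase starts there (t.startswith(p, i))
def escScan (cs : List Char) : Bool :=
  if escalationPhrasesAlt.any (fun p => p.toList.isPrefixOf cs) then true
  else
    match cs with
    | [] => false
    | _ :: rest => escScan rest

def is_escalation_request_py_alt (text : String) : Bool :=
  escScan (PySem.Str.lower text).toList

-- ===== PRECONDITION & SPEC =====
def Spec_is_escalation_request_py (text : String) (out : Bool) : Prop := out = is_escalation_request_py_alt text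
instance (text : String) (out : Bool) : Decidable (Spec_is_escalation_request_py text out) := by unfold Spec_is_escalation_request_py; infer_instance

-- ===== CLAIM (what is proved, stated in full; the proofs are below) =====
def Claim_equal_is_escalation_request_py : Prop := ∀ (text : String), Dom_is_escalation_request_py text → Spec_is_escalation_request_py text (is_escalation_request_py text)

-- ===== LEMMAS AND PROOFS =====

-- B's suffix scan finds a phrase iff some phrase is an infix of the scanned list
theorem escScan_iff (cs : List Char) :
    escScan cs = true ↔ ∃ p ∈ escalationPhrasesAlt, p.toList <:+: cs := by
  induction cs with
  | nil =>
      rw [escScan]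
      simp [List.any_eq_true, List.isPrefixOf_iff_prefix, List.prefix_nil, List.infix_nil]
  | cons c rest ih =>
      rw [escScan]
      by_cases h : escalationPhrasesAlt.any (fun p => p.toList.isPrefixOf (c :: rest)) = true
      · rw [if_pos h]
        simp only [true_iff]
        rcases List.any_eq_true.mp h with ⟨p, hp, hpre⟩
        exact ⟨p, hp, ((List.isPrefixOf_iff_prefix).mp hpre).isInfix⟩
      · rw [if_neg h]
        rw [ih]
        constructor
        · rintro ⟨p, hp, hinf⟩
          exact ⟨p, hp, hinf.trans (List.infix_cons_iff.mpr (Or.inr (List.infix_refl rest)))⟩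
        · rintro ⟨p, hp, hinf⟩
          rcases List.infix_cons_iff.mp hinf with hpre | hinf'
          · exact absurd (List.any_eq_true.mpr ⟨p, hp, (List.isPrefixOf_iff_prefix).mpr hpre⟩) h
          · exact ⟨p, hp, hinf'⟩

-- ===== VERDICT (by name: the statement is the Claim_ definition above) =====
theorem is_escalation_request_py_spec : Claim_equal_is_escalation_request_py := by
  intro text _
  unfold Spec_is_escalation_request_py is_escalation_request_py is_escalation_request_py_alt
  rw [Bool.eq_iff_iff, escScan_iff, List.any_eq_true]
  constructor
  · rintro ⟨p, hp, hin⟩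
    exact ⟨p, hp, (PySem.Str.isIn_iff_infix p _).mp hin⟩
  · rintro ⟨p, hp, hinf⟩
    exact ⟨p, hp, (PySem.Str.isIn_iff_infix p _).mpr hinf⟩
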